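-- pv_equiv track=rewrite | github.com/FranckCHAMBON/ClasseVirtuelle | Term_NSI/devoirs/4-dm2/Corrigé/S8/Q3.py | somme
-- ===== SOURCE A (Python) =====
-- def somme(nb1: int, nb2: int, nb3: int) -> int:
--     """Cette fonction prend en paramètre 3 entiers non nuls. Cette fonctionne doit déterminer si l'un d'eux est égal à la
--     somme des deux autres, sinon la fonction renvoie 0.
--     >>> 18 42 24
--     42
--     >>> 11 37 18
--     0
--     """
--     for x in range(3):
--         if nb1 + nb2 == nb3:
--             return nb3
--         elif nb2 + nb3 == nb1:
--             return nb1
--         elif nb1 + nb3 == nb2: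
--             return nb2
--         else:
--             return 0
-- ===== SOURCE B (Python) =====
-- def somme(nb1: int, nb2: int, nb3: int) -> int:
--     s = nb1 + nb2 + nb3
--     if s % 2 == 0:
--         half = s // 2
--         if half in (nb1, nb2, nb3):
--             return half
--     return 0
-- ===== Notes on version B (the rewrite author's own statement) =====
-- stated objective: simpler
-- what changed: Replaces the three pairwise sum comparisons (wrapped in a pointless range(3) loop) with one arithmetic test: a number equal to the sum of the other two must be half the total, so B checks whether (nb1+nb2+nb3)/2 is one of the three.
import Mathlib
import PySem

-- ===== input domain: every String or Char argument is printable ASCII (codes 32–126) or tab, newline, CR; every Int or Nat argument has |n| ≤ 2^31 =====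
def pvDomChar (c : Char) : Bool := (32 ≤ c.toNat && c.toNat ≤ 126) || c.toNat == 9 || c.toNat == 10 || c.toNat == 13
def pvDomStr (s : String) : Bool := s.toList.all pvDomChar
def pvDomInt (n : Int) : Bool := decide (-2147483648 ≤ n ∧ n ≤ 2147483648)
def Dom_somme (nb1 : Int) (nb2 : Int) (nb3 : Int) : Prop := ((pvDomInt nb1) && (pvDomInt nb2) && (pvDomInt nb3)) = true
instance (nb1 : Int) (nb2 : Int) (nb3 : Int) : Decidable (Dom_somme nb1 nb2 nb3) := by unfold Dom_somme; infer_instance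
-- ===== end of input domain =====

-- B replaces A's three pairwise sum comparisons with one half-sum arithmetic test (simpler).


-- ===== PORT A =====
-- A's loop 'for x in range(3)' always returns on the first iteration; the body is the branch chain below.
def somme (nb1 : Int) (nb2 : Int) (nb3 : Int) : Int :=
  if nb1 + nb2 == nb3 then nb3
  else if nb2 + nb3 == nb1 then nb1
  else if nb1 + nb3 == nb2 then nb2
  else 0

-- ===== PORT B =====
def somme_alt (nb1 : Int) (nb2 : Int) (nb3 : Int) : Int :=
  let s := nb1 + nb2 + nb3
  if PySem.Int.mod s 2 == 0 then
    let half := PySem.Int.floordiv s 2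
    if half == nb1 || half == nb2 || half == nb3 then half
    else 0
  else 0

-- ===== PRECONDITION & SPEC =====
def Spec_somme (nb1 : Int) (nb2 : Int) (nb3 : Int) (out : Int) : Prop := out = somme_alt nb1 nb2 nb3
instance (nb1 : Int) (nb2 : Int) (nb3 : Int) (out : Int) : Decidable (Spec_somme nb1 nb2 nb3 out) := by unfold Spec_somme; infer_instance

-- ===== CLAIM (what is proved, stated in full; the proofs are below) =====
def Claim_equal_somme : Prop := ∀ (nb1 : Int) (nb2 : Int) (nb3 : Int), Dom_somme nb1 nb2 nb3 → Spec_somme nb1 nb2 nb3 (somme nb1 nb2 nb3)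

-- ===== LEMMAS AND PROOFS =====
theorem somme_eq (nb1 nb2 nb3 : Int) : somme nb1 nb2 nb3 = somme_alt nb1 nb2 nb3 := by
  have hmod : PySem.Int.mod (nb1 + nb2 + nb3) 2 = (nb1 + nb2 + nb3) % 2 :=
    PySem.Int.mod_eq_emod_of_pos (by norm_num)
  have hdiv : PySem.Int.floordiv (nb1 + nb2 + nb3) 2 = (nb1 + nb2 + nb3) / 2 :=
    PySem.Int.floordiv_eq_ediv_of_pos (by norm_num)
  simp only [somme, somme_alt, hmod, hdiv, beq_iff_eq, Bool.or_eq_true]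
  split_ifs <;> omega

-- ===== VERDICT (by name: the statement is the Claim_ definition above) =====
theorem somme_spec : Claim_equal_somme := by
  intro nb1 nb2 nb3 _
  exact somme_eq nb1 nb2 nb3
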